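-- pv_equiv track=rewrite | github.com/JagadeeshLTTS/Python_assignment_Genesis2021_99004951 | Ass_Qn-15.py | rmvDuplicate
-- ===== SOURCE A (Python) =====
-- def rmvDuplicate(x):
--     _size = len(x)
--     repeated = []
--     for i in range(_size):
--         k = i + 1
--         for j in range(k, _size):
--             if x[i] == x[j] and x[i] not in repeated:
--                 repeated.append(x[i])
--     return repeated
-- ===== SOURCE B (Python) =====
-- def rmvDuplicate(x):
--     seen = []
--     duplicates = []
--     for i in range(len(x)):
--         v = x[i]
--         if v in seen:
--             if v not in duplicates:
--                 duplicates.append(v)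
--         else:
--             seen.append(v)
--     return [v for v in seen if v in duplicates]
-- ===== Notes on version B (the rewrite author's own statement) =====
-- stated objective: faster
-- what changed: Replaces the all-pairs nested scan with a single forward pass that builds 'seen' (first occurrences in order) and 'duplicates' (values met again), then filters 'seen' by membership in 'duplicates'.
import Mathlib
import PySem

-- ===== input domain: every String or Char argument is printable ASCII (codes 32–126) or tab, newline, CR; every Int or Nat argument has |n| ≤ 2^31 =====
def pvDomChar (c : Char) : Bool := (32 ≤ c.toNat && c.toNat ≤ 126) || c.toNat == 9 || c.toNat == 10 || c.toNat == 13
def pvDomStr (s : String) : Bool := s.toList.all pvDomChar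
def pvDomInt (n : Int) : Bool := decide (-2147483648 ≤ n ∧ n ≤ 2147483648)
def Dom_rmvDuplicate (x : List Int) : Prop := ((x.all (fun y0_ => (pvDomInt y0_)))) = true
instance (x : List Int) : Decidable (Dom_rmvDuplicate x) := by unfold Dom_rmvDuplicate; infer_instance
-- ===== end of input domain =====

-- B replaces A's all-pairs nested scan by one forward pass building `seen` and `duplicates`,
-- then filters `seen` by membership in `duplicates` (objective: faster).

-- ===== PORT A =====
def rmvDuplicate (x : List Int) : List Int :=
  let size : Int := x.length
  (PySem.List.pyRange 0 size 1).foldl (fun repeated i =>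
    let k := i + 1
    (PySem.List.pyRange k size 1).foldl (fun repeated j =>
      if PySem.List.pyGetD x i 0 = PySem.List.pyGetD x j 0 ∧ PySem.List.pyGetD x i 0 ∉ repeated
      then repeated ++ [PySem.List.pyGetD x i 0] else repeated) repeated) []

-- ===== PORT B =====
def rmvDuplicate_alt (x : List Int) : List Int :=
  let sd := (PySem.List.pyRange 0 (x.length : Int) 1).foldl
    (fun (sd : List Int × List Int) i =>
      let v := PySem.List.pyGetD x i 0
      if v ∈ sd.1 then
        (sd.1, if v ∈ sd.2 then sd.2 else sd.2 ++ [v])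
      else (sd.1 ++ [v], sd.2)) ([], [])
  sd.1.filter (fun v => decide (v ∈ sd.2))

-- ===== PRECONDITION & SPEC =====
def Spec_rmvDuplicate (x : List Int) (out : List Int) : Prop := out = rmvDuplicate_alt x
instance (x : List Int) (out : List Int) : Decidable (Spec_rmvDuplicate x out) := by unfold Spec_rmvDuplicate; infer_instance

-- ===== CLAIM (what is proved, stated in full; the proofs are below) =====
def Claim_equal_rmvDuplicate : Prop := ∀ (x : List Int), Dom_rmvDuplicate x → Spec_rmvDuplicate x (rmvDuplicate x)

-- ===== LEMMAS AND PROOFS =====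

-- A's outer loop, restated structurally over the suffix being scanned.
def auxA (rep : List Int) : List Int → List Int
  | [] => rep
  | a :: t => auxA (if a ∈ t ∧ a ∉ rep then rep ++ [a] else rep) t

-- B's loop body, as a step over (seen, duplicates).
def stepB (sd : List Int × List Int) (v : Int) : List Int × List Int :=
  if v ∈ sd.1 then (sd.1, if v ∈ sd.2 then sd.2 else sd.2 ++ [v])
  else (sd.1 ++ [v], sd.2)

-- A's inner loop: append v once iff v occurs in the scanned suffix and is not yet recorded.
theorem innerA (v : Int) (l rep : List Int) :
    l.foldl (fun rep w => if v = w ∧ v ∉ rep then rep ++ [v] else rep) rep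
      = if v ∈ l ∧ v ∉ rep then rep ++ [v] else rep := by
  induction l generalizing rep with
  | nil => simp
  | cons a t ih =>
    simp only [List.foldl_cons, ih]
    by_cases hva : v = a
    · subst hva
      by_cases hr : v ∈ rep
      · simp [hr]
      · simp [hr]
    · simp only [if_neg (by tauto : ¬ (v = a ∧ v ∉ rep))]
      by_cases hl : v ∈ t
      · simp [hl, hva]
      · simp [hl, hva]

-- A's outer loop over indices k..len equals auxA on the suffix x.drop k.
theorem outerA (x : List Int) (k : Nat) (rep : List Int) (hk : k ≤ x.length) :
    (PySem.List.pyRange (k : Int) (x.length : Int) 1).foldl (fun repeated i =>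
      (PySem.List.pyRange (i + 1) (x.length : Int) 1).foldl (fun repeated j =>
        if PySem.List.pyGetD x i 0 = PySem.List.pyGetD x j 0 ∧ PySem.List.pyGetD x i 0 ∉ repeated
        then repeated ++ [PySem.List.pyGetD x i 0] else repeated) repeated) rep
      = auxA rep (x.drop k) := by
  induction hn : x.length - k generalizing k rep with
  | zero =>
    have hk' : k = x.length := by omega
    subst hk'
    rw [PySem.List.pyRange_one_eq_nil le_rfl]
    simp [auxA, List.drop_length]
  | succ n ih =>
    have hklt : k < x.length := by omega
    rw [PySem.List.pyRange_one_cons (by exact_mod_cast hklt)]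
    simp only [List.foldl_cons]
    have hdrop : x.drop k = x[k] :: x.drop (k + 1) := List.drop_eq_getElem_cons hklt
    have hget : PySem.List.pyGetD x ((k : Nat) : Int) 0 = x[k] := by
      rw [PySem.List.pyGetD_natCast]; exact List.getD_eq_getElem x 0 hklt
    rw [hget]
    have hinner := PySem.List.foldl_pyRange_pyGetD' x 0
      (fun rep w => if x[k] = w ∧ x[k] ∉ rep then rep ++ [x[k]] else rep) rep
      (a := (k : Int) + 1) (by omega)
    have htn : ((k : Int) + 1).toNat = k + 1 := by omega
    rw [htn] at hinner
    rw [hinner, innerA, hdrop, auxA]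
    have hcast : ((k : Int) + 1) = ((k + 1 : Nat) : Int) := by push_cast; ring
    rw [hcast, ih (k + 1) _ (by omega) (by omega)]

-- auxA characterised: it appends the first occurrences of the still-unrecorded repeated values.
theorem auxA_spec (l rep : List Int) :
    auxA rep l = rep ++ (PySem.Set.ofList l).filter
      (fun v => decide (v ∉ rep) && decide (2 ≤ l.count v)) := by
  induction l generalizing rep with
  | nil => simp [auxA, PySem.Set.ofList_nil]
  | cons a t ih =>
    rw [auxA, ih, PySem.Set.ofList_cons, List.filter_cons]
    by_cases hat : a ∈ t
    · by_cases har : a ∈ rep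
      · rw [if_neg (by tauto)]
        rw [if_neg (by simp [har])]
        congr 1
        unfold PySem.Set.discard
        rw [List.filter_filter]
        apply List.filter_congr
        intro v hv
        have hvt : v ∈ t := (PySem.Set.mem_ofList _ _).1 hv
        by_cases hva : v = a
        · subst hva; simp [har]
        · simp [hva, Ne.symm hva]
      · rw [if_pos ⟨hat, har⟩]
        have hca : 2 ≤ (a :: t).count a := by
          rw [List.count_cons_self]
          have : 1 ≤ t.count a := List.count_pos_iff.2 hat
          omega
        rw [if_pos (by simp [har, hat])]
        conv_rhs => rw [List.append_cons]
        congr 1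
        unfold PySem.Set.discard
        rw [List.filter_filter]
        apply List.filter_congr
        intro v hv
        have hvt : v ∈ t := (PySem.Set.mem_ofList _ _).1 hv
        by_cases hva : v = a
        · subst hva; simp
        · simp [hva, List.mem_append, Ne.symm hva]
    · rw [if_neg (by tauto)]
      have hca : ¬ 2 ≤ (a :: t).count a := by
        rw [List.count_cons_self]
        have : t.count a = 0 := List.count_eq_zero.2 hat
        omega
      rw [if_neg (by simp [hat])]
      congr 1
      have hdisc : (PySem.Set.ofList t).discard a = PySem.Set.ofList t := by
        unfold PySem.Set.discard
        apply List.filter_eq_self.2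
        intro v hv
        have hvt : v ∈ t := (PySem.Set.mem_ofList _ _).1 hv
        simp; rintro rfl; exact hat hvt
      rw [hdisc]
      apply List.filter_congr
      intro v hv
      have hvt : v ∈ t := (PySem.Set.mem_ofList _ _).1 hv
      have hva : v ≠ a := by rintro rfl; exact hat hvt
      simp [Ne.symm hva]

-- Membership in `duplicates` after one step, stated as pure logic over the atoms.
theorem memIff_pos (a v : Int) (s d t : List Int) (has : a ∈ s) :
    ((v ∈ d ∨ v = a) ∨ (v ∈ s ∧ v ∈ t) ∨ 2 ≤ t.count v)
      ↔ (v ∈ d ∨ (v ∈ s ∧ v ∈ a :: t) ∨ 2 ≤ (a :: t).count v) := by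
  by_cases hva : v = a
  · subst hva
    constructor
    · intro _; exact Or.inr (Or.inl ⟨has, by simp⟩)
    · intro _; exact Or.inl (Or.inr rfl)
  · have hcc : (a :: t).count v = t.count v := by simp [Ne.symm hva]
    have hm2 : v ∈ a :: t ↔ v ∈ t := by simp [hva]
    rw [hcc, hm2]
    tauto

theorem memIff_neg (a v : Int) (s d t : List Int) (has : a ∉ s) :
    (v ∈ d ∨ (v ∈ s ++ [a] ∧ v ∈ t) ∨ 2 ≤ t.count v)
      ↔ (v ∈ d ∨ (v ∈ s ∧ v ∈ a :: t) ∨ 2 ≤ (a :: t).count v) := by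
  by_cases hva : v = a
  · subst hva
    rw [List.count_cons_self]
    constructor
    · rintro (h | ⟨_, ht⟩ | h)
      · exact Or.inl h
      · exact Or.inr (Or.inr (by have := List.count_pos_iff.2 ht; omega))
      · exact Or.inr (Or.inr (by omega))
    · rintro (h | ⟨hs, _⟩ | h)
      · exact Or.inl h
      · exact absurd hs has
      · exact Or.inr (Or.inl ⟨by simp, List.count_pos_iff.1 (by omega)⟩)
  · have hcc : (a :: t).count v = t.count v := by simp [Ne.symm hva]
    have hm1 : v ∈ s ++ [a] ↔ v ∈ s := by simp [hva]
    have hm2 : v ∈ a :: t ↔ v ∈ t := by simp [hva]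
    rw [hcc, hm1, hm2]

-- B's loop invariant: seen accumulates Set.update, and membership in duplicates
-- is "already a duplicate, or seen before and met again, or met twice in the rest".
theorem foldB (l : List Int) (s d : List Int) :
    (l.foldl stepB (s, d)).1 = PySem.Set.update s l ∧
    (∀ v : Int, v ∈ (l.foldl stepB (s, d)).2 ↔ v ∈ d ∨ (v ∈ s ∧ v ∈ l) ∨ 2 ≤ l.count v) := by
  induction l generalizing s d with
  | nil => simp [PySem.Set.update_nil]
  | cons a t ih =>
    rw [List.foldl_cons]
    by_cases has : a ∈ s
    · have hstep : stepB (s, d) a = (s, if a ∈ d then d else d ++ [a]) := by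
        simp [stepB, has]
      rw [hstep]
      obtain ⟨ih1, ih2⟩ := ih s (if a ∈ d then d else d ++ [a])
      refine ⟨by rw [ih1, PySem.Set.update_cons, PySem.Set.add_of_mem has], fun v => ?_⟩
      rw [ih2]
      have hmem : v ∈ (if a ∈ d then d else d ++ [a]) ↔ v ∈ d ∨ v = a := by
        split_ifs with h
        · constructor
          · tauto
          · rintro (hv | rfl)
            · exact hv
            · exact h
        · simp
      rw [hmem]
      exact memIff_pos a v s d t has
    · have hstep : stepB (s, d) a = (s ++ [a], d) := by simp [stepB, has]
      rw [hstep]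
      obtain ⟨ih1, ih2⟩ := ih (s ++ [a]) d
      refine ⟨by rw [ih1, PySem.Set.update_cons, PySem.Set.add_of_not_mem has], fun v => ?_⟩
      rw [ih2]
      exact memIff_neg a v s d t has

-- Both programs compute the first occurrences of the values occurring at least twice.
theorem A_char (x : List Int) :
    rmvDuplicate x = (PySem.Set.ofList x).filter (fun v => decide (2 ≤ x.count v)) := by
  rw [rmvDuplicate]
  have h := outerA x 0 [] (Nat.zero_le _)
  simp only [Nat.cast_zero, List.drop_zero] at h
  rw [h, auxA_spec]
  simp

theorem B_char (x : List Int) :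
    rmvDuplicate_alt x = (PySem.Set.ofList x).filter (fun v => decide (2 ≤ x.count v)) := by
  rw [rmvDuplicate_alt]
  have hfold : (PySem.List.pyRange 0 (x.length : Int) 1).foldl
      (fun (sd : List Int × List Int) i =>
        let v := PySem.List.pyGetD x i 0
        if v ∈ sd.1 then (sd.1, if v ∈ sd.2 then sd.2 else sd.2 ++ [v])
        else (sd.1 ++ [v], sd.2)) ([], []) = x.foldl stepB ([], []) := by
    exact PySem.List.foldl_pyRange_zero_pyGetD' x 0 stepB ([], [])
  rw [hfold]
  obtain ⟨h1, h2⟩ := foldB x [] []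
  rw [h1, show PySem.Set.update [] x = PySem.Set.ofList x from PySem.Set.update_nil_left x]
  apply List.filter_congr
  intro v hv
  have := h2 v
  simp only [List.not_mem_nil, false_or, false_and] at this
  simp [this]

-- ===== VERDICT (by name: the statement is the Claim_ definition above) =====
theorem rmvDuplicate_spec : Claim_equal_rmvDuplicate := by
  intro x _
  show rmvDuplicate x = rmvDuplicate_alt x
  rw [A_char, B_char]
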